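-- pv_equiv track=rewrite | github.com/ElchiBey/Multi-Source-Data-Collection-System | src/utils/captcha_handler.py | _determine_captcha_type_from_text
-- ===== SOURCE A (Python) =====
-- from typing import Dict, List, Optional, Tuple, Any
--
-- def _determine_captcha_type_from_text(indicators: List[str]) -> str:
--     """Determine CAPTCHA type from text indicators."""
--     if any("recaptcha" in ind for ind in indicators):
--         return "recaptcha"
--     elif any("hcaptcha" in ind for ind in indicators):
--         return "hcaptcha"
--     elif any("cloudflare" in ind for ind in indicators):
--         return "cloudflare"
--     elif any("captcha" in ind for ind in indicators):
--         return "generic_captcha"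
--     else:
--         return "unknown"
-- ===== SOURCE B (Python) =====
-- def _determine_captcha_type_from_text(indicators):
--     """Determine CAPTCHA type from text indicators (single pass over the list)."""
--     has_re = has_h = has_cf = has_any = False
--     for ind in indicators:
--         if "recaptcha" in ind:
--             has_re = True
--         if "hcaptcha" in ind:
--             has_h = True
--         if "cloudflare" in ind:
--             has_cf = True
--         if "captcha" in ind:
--             has_any = True
--     if has_re:
--         return "recaptcha"
--     if has_h:
--         return "hcaptcha"
--     if has_cf:
--         return "cloudflare"
--     if has_any:
--         return "generic_captcha"
--     return "unknown"
-- ===== Notes on version B (the rewrite author's own statement) =====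
-- stated objective: alternative
-- what changed: Replaces four short-circuiting any() generator scans over the list with a single pass that records which keywords were seen, then decides by priority order.
import Mathlib
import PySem

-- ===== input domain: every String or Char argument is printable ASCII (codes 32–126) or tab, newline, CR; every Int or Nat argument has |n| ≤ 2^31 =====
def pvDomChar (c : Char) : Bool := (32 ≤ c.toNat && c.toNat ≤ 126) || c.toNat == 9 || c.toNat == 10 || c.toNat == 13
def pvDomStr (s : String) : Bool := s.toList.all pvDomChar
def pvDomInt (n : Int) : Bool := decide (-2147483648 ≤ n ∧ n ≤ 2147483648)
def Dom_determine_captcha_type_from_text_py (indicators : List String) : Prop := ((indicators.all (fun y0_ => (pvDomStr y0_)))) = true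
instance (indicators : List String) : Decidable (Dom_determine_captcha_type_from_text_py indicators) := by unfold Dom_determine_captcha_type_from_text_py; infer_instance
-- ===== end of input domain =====

-- B replaces A's four short-circuiting any() scans by one pass that records which keywords were seen, then decides by priority (alternative decomposition, same cost).

-- ===== PORT A =====
def determine_captcha_type_from_text_py (indicators : List String) : String :=
  if indicators.any (fun ind => PySem.Str.isIn "recaptcha" ind) then "recaptcha"
  else if indicators.any (fun ind => PySem.Str.isIn "hcaptcha" ind) then "hcaptcha"
  else if indicators.any (fun ind => PySem.Str.isIn "cloudflare" ind) then "cloudflare"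
  else if indicators.any (fun ind => PySem.Str.isIn "captcha" ind) then "generic_captcha"
  else "unknown"

-- ===== PORT B =====
-- single pass: fold collecting the four seen-flags, then a priority decision
def captchaFlagsStep (st : Bool × Bool × Bool × Bool) (ind : String) : Bool × Bool × Bool × Bool :=
  (st.1 || PySem.Str.isIn "recaptcha" ind,
   st.2.1 || PySem.Str.isIn "hcaptcha" ind,
   st.2.2.1 || PySem.Str.isIn "cloudflare" ind,
   st.2.2.2 || PySem.Str.isIn "captcha" ind)

def determine_captcha_type_from_text_py_alt (indicators : List String) : String :=
  let st := indicators.foldl captchaFlagsStep (false, false, false, false)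
  if st.1 then "recaptcha"
  else if st.2.1 then "hcaptcha"
  else if st.2.2.1 then "cloudflare"
  else if st.2.2.2 then "generic_captcha"
  else "unknown"

-- ===== PRECONDITION & SPEC =====
def Spec_determine_captcha_type_from_text_py (indicators : List String) (out : String) : Prop := out = determine_captcha_type_from_text_py_alt indicators
instance (indicators : List String) (out : String) : Decidable (Spec_determine_captcha_type_from_text_py indicators out) := by unfold Spec_determine_captcha_type_from_text_py; infer_instance

-- ===== CLAIM (what is proved, stated in full; the proofs are below) =====
def Claim_equal_determine_captcha_type_from_text_py : Prop := ∀ (indicators : List String), Dom_determine_captcha_type_from_text_py indicators → Spec_determine_captcha_type_from_text_py indicators (determine_captcha_type_from_text_py indicators)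

-- ===== LEMMAS AND PROOFS =====

-- the fold's state is exactly the four any-scans, OR-ed onto the initial flags
theorem captchaFlags_foldl (xs : List String) (st : Bool × Bool × Bool × Bool) :
    xs.foldl captchaFlagsStep st =
      (st.1 || xs.any (fun ind => PySem.Str.isIn "recaptcha" ind),
       st.2.1 || xs.any (fun ind => PySem.Str.isIn "hcaptcha" ind),
       st.2.2.1 || xs.any (fun ind => PySem.Str.isIn "cloudflare" ind),
       st.2.2.2 || xs.any (fun ind => PySem.Str.isIn "captcha" ind)) := by
  induction xs generalizing st with
  | nil => simp
  | cons x xs ih =>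
    simp only [List.foldl_cons, List.any_cons, ih, captchaFlagsStep, Bool.or_assoc]

-- ===== VERDICT (by name: the statement is the Claim_ definition above) =====
theorem determine_captcha_type_from_text_py_spec : Claim_equal_determine_captcha_type_from_text_py := by
  intro indicators _
  unfold Spec_determine_captcha_type_from_text_py determine_captcha_type_from_text_py determine_captcha_type_from_text_py_alt
  simp [captchaFlags_foldl]
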